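-- pv_equiv track=rewrite | github.com/weber-niklas/SportsCenterTracker | app.py | get_ten_minute_data
-- ===== SOURCE A (Python) =====
-- from typing import Dict, List, Tuple
--
-- def get_ten_minute_data(
--     daily_data: Dict[str, Dict[str, int]], key: str
-- ) -> Tuple[List[str], List[int]]:
--     times = [
--         f"{hour:02d}:{minute:02d}"
--         for hour in range(8, 22)
--         for minute in range(0, 60, 10)
--     ]
--     times.append("22:00")  # Ensure last entry is 22:00
--     counts = [daily_data.get(time, {}).get(key, 0) for time in times]
--     return times, counts
-- ===== SOURCE B (Python) =====
-- def get_ten_minute_data(daily_data, key):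
--     # Inverted traversal: index the fixed 10-minute grid once, start all counts
--     # at zero, then scatter by scanning the data a single time.
--     times = [f"{m // 60:02d}:{m % 60:02d}" for m in range(480, 1321, 10)]
--     slot = {t: i for i, t in enumerate(times)}
--     counts = [0] * len(times)
--     for t, inner in daily_data.items():
--         i = slot.get(t)
--         if i is not None:
--             counts[i] = inner.get(key, 0)
--     return times, counts
-- ===== Notes on version B (the rewrite author's own statement) =====
-- stated objective: alternative
-- what changed: Inverts the traversal: instead of A's nested hour/minute label comprehension plus a per-label dict lookup pass, B builds a label->slot index over the fixed grid once, starts counts at all zeros, and scatters counts by scanning the data dict a single time.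
import Mathlib
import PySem

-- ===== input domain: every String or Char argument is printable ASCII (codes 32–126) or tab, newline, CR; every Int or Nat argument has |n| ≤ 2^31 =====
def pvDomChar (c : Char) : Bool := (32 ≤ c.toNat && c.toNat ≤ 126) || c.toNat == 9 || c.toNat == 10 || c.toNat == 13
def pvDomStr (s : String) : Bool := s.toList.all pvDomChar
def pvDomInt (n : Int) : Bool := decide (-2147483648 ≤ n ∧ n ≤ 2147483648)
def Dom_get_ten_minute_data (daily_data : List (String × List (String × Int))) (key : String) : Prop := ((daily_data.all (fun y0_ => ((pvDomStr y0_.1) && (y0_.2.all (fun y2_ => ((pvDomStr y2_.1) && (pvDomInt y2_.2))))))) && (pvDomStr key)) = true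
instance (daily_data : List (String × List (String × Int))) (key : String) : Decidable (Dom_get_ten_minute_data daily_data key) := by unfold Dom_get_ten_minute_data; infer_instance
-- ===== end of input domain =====

-- B inverts the traversal: it indexes the fixed 10-minute grid once (label -> slot),
-- starts all counts at zero, and scatters counts by scanning the data dict a single time,
-- instead of A's nested hour/minute label comprehension plus a per-label lookup pass.

-- ===== PORT A =====
def get_ten_minute_data (daily_data : List (String × List (String × Int))) (key : String) : List String × List Int :=
  let times :=
    ((PySem.List.pyRange 8 22 1).flatMap (fun hour =>
      (PySem.List.pyRange 0 60 10).map (fun minute =>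
        PySem.Str.zfill (PySem.Int.toStr hour) 2 ++ ":" ++ PySem.Str.zfill (PySem.Int.toStr minute) 2)))
    ++ ["22:00"]  -- Ensure last entry is 22:00
  let counts := times.map (fun time =>
    (PySem.Dict.mk ((PySem.Dict.mk daily_data).getD time [])).getD key 0)
  (times, counts)

-- ===== PORT B =====
def get_ten_minute_data_alt (daily_data : List (String × List (String × Int))) (key : String) : List String × List Int :=
  let times := (PySem.List.pyRange 480 1321 10).map (fun m =>
    PySem.Str.zfill (PySem.Int.toStr (PySem.Int.floordiv m 60)) 2 ++ ":" ++ PySem.Str.zfill (PySem.Int.toStr (PySem.Int.mod m 60)) 2)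
  let slot := PySem.Dict.mk ((PySem.List.enumerate times).map (fun p => (p.2, p.1)))
  let counts := daily_data.foldl (fun counts p =>
    match slot.get? p.1 with
    | some i => counts.set i.toNat ((PySem.Dict.mk p.2).getD key 0)
    | none => counts) (List.replicate times.length 0)
  (times, counts)

-- ===== PRECONDITION & SPEC =====
-- Pre_ excludes association lists with duplicate time keys: they encode no Python dict
-- (a dict cannot hold duplicate keys), and A's first-match lookup versus B's scatter
-- order are both accidental choices on such lists.
def Pre_get_ten_minute_data (daily_data : List (String × List (String × Int))) (key : String) : Prop :=
  (daily_data.map Prod.fst).Nodup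
instance (daily_data : List (String × List (String × Int))) (key : String) : Decidable (Pre_get_ten_minute_data daily_data key) := by unfold Pre_get_ten_minute_data; infer_instance
def pvWitness_get_ten_minute_data : (List (String × List (String × Int))) × String :=
  ([("08:00", [("k", 3)]), ("07:50", [("k", 9)]), ("22:00", [("x", 1)])], "k")

def Spec_get_ten_minute_data (daily_data : List (String × List (String × Int))) (key : String) (out : List String × List Int) : Prop := out = get_ten_minute_data_alt daily_data key
instance (daily_data : List (String × List (String × Int))) (key : String) (out : List String × List Int) : Decidable (Spec_get_ten_minute_data daily_data key out) := by unfold Spec_get_ten_minute_data; infer_instance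

-- ===== CLAIM (what is proved, stated in full; the proofs are below) =====
def Claim_equal_get_ten_minute_data : Prop := ∀ (daily_data : List (String × List (String × Int))) (key : String), Dom_get_ten_minute_data daily_data key → Pre_get_ten_minute_data daily_data key → Spec_get_ten_minute_data daily_data key (get_ten_minute_data daily_data key)

-- ===== LEMMAS AND PROOFS =====

-- the grid of labels (proof-only abbreviation, definitionally B's `times`)
def pvTimes : List String :=
  (PySem.List.pyRange 480 1321 10).map (fun m =>
    PySem.Str.zfill (PySem.Int.toStr (PySem.Int.floordiv m 60)) 2 ++ ":" ++ PySem.Str.zfill (PySem.Int.toStr (PySem.Int.mod m 60)) 2)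

theorem pvTimes_nodup : pvTimes.Nodup := by decide

-- A's nested-comprehension labels equal the grid (a closed computation).
theorem pv_timesA_eq :
    ((PySem.List.pyRange 8 22 1).flatMap (fun hour =>
      (PySem.List.pyRange 0 60 10).map (fun minute =>
        PySem.Str.zfill (PySem.Int.toStr hour) 2 ++ ":" ++ PySem.Str.zfill (PySem.Int.toStr minute) 2)))
    ++ ["22:00"] = pvTimes := by decide

-- the slot dictionary looks up the (first) index of a label in ts
theorem pv_slot_get? (ts : List String) (s : Int) (t : String) :
    (PySem.Dict.mk ((PySem.List.enumerate ts s).map (fun p => (p.2, p.1)))).get? t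
      = (List.idxOf? t ts).map (fun k => s + (k : Int)) := by
  induction ts generalizing s with
  | nil => rfl
  | cons x xs ih =>
    rw [PySem.List.enumerate_cons]
    simp only [List.map_cons, PySem.Dict.get?_mk_cons, List.idxOf?_cons]
    by_cases h : (x == t) = true
    · simp [h]
    · have h' : (x == t) = false := by simpa using h
      rw [if_neg (by simp [h']), if_neg (by simp [h']), ih (s + 1)]
      cases List.idxOf? t xs with
      | none => simp
      | some k => simp; ring

-- lookup on a literal dict, cons step of getD
theorem pv_getD_mk_cons {ν : Type} (k : String) (v : ν) (rest : List (String × ν)) (x : String) (d : ν) :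
    (PySem.Dict.mk ((k, v) :: rest)).getD x d
      = if (k == x) = true then v else (PySem.Dict.mk rest).getD x d := by
  rw [PySem.Dict.getD_eq_get?_getD, PySem.Dict.get?_mk_cons]
  split
  · rfl
  · rw [PySem.Dict.getD_eq_get?_getD]

-- A's per-label value, characterised as the first matching entry of the association list
theorem pv_A_lookup (dd : List (String × List (String × Int))) (key : String) (t : String) :
    (PySem.Dict.mk ((PySem.Dict.mk dd).getD t [])).getD key 0
      = (match dd.find? (fun p => p.1 == t) with
        | some p => (PySem.Dict.mk p.2).getD key 0
        | none => 0) := by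
  induction dd with
  | nil => rfl
  | cons x xs ih =>
    obtain ⟨a, b⟩ := x
    rw [pv_getD_mk_cons a b xs t []]
    by_cases h : (a == t) = true
    · rw [if_pos h, List.find?_cons_of_pos (by simpa using h)]
    · rw [if_neg h, List.find?_cons_of_neg (by simpa using h), ih]

-- find? with pointwise-equal predicates (no such congruence lemma in the library)
theorem pv_find?_congr {α : Type} {p q : α → Bool} (l : List α) (h : ∀ x ∈ l, p x = q x) :
    l.find? p = l.find? q := by
  induction l with
  | nil => rfl
  | cons x xs ih =>
    simp only [List.find?]
    rw [h x (by simp)]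
    split
    · rfl
    · exact ih (fun y hy => h y (by simp [hy]))

-- the scatter loop, element by element: with distinct keys, slot j holds the data
-- value of the (unique) entry whose key is ts[j], else the initial value.
theorem pv_scatter_get (ts : List String) (g : List (String × Int) → Int)
    (L : List (String × List (String × Int))) (cs : List Int)
    (hn : (L.map Prod.fst).Nodup) (j : Nat) (hj : j < cs.length) :
    (L.foldl (fun cs p =>
      match List.idxOf? p.1 ts with
      | some k => cs.set k (g p.2)
      | none => cs) cs)[j]?
      = some (match L.find? (fun p => List.idxOf? p.1 ts == some j) with
        | some p => g p.2
        | none => cs[j]) := by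
  induction L generalizing cs with
  | nil =>
    simp only [List.foldl_nil, List.find?_nil]
    exact List.getElem?_eq_getElem hj
  | cons x xs ih =>
    simp only [List.map_cons, List.nodup_cons] at hn
    obtain ⟨hx, hxs⟩ := hn
    rw [List.foldl_cons]
    by_cases hfire : List.idxOf? x.1 ts = some j
    · -- x lands in slot j; no later entry can (its key would equal ts[j] = x.1)
      rw [List.find?_cons_of_pos (by simp [hfire])]
      have hset : (match List.idxOf? x.1 ts with
          | some k => cs.set k (g x.2)
          | none => cs) = cs.set j (g x.2) := by rw [hfire]
      rw [hset]
      have hlen : j < (cs.set j (g x.2)).length := by simpa using hj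
      rw [ih (cs.set j (g x.2)) hxs hlen]
      have hnone : xs.find? (fun p => List.idxOf? p.1 ts == some j) = none := by
        rw [List.find?_eq_none]
        intro p hp hpj
        have hpj' : List.idxOf? p.1 ts = some j := by simpa using hpj
        obtain ⟨hjt, hpt, -⟩ := List.idxOf?_eq_some_iff.mp hpj'
        obtain ⟨hjt', hxt, -⟩ := List.idxOf?_eq_some_iff.mp hfire
        exact hx ((hpt ▸ hxt : p.1 = x.1) ▸ List.mem_map_of_mem hp)
      rw [hnone]
      simp [List.getElem_set_self hlen]
    · -- x does not land in slot j
      rw [List.find?_cons_of_neg (by simp [hfire])]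
      cases hidx : List.idxOf? x.1 ts with
      | none => exact ih cs hxs hj
      | some k =>
        have hkj : k ≠ j := fun h => hfire (h ▸ hidx)
        have hlen : j < (cs.set k (g x.2)).length := by simpa using hj
        have hih := ih (cs.set k (g x.2)) hxs hlen
        rw [show (match (some k : Option Nat) with
            | some k => cs.set k (g x.2)
            | none => cs) = cs.set k (g x.2) from rfl, hih]
        congr 1
        cases xs.find? (fun p => List.idxOf? p.1 ts == some j) with
        | some p => rfl
        | none => simp [List.getElem_set_ne hkj]

-- the scatter loop preserves length
theorem pv_scatter_length (step : List Int → (String × List (String × Int)) → List Int)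
    (hstep : ∀ cs p, (step cs p).length = cs.length)
    (L : List (String × List (String × Int))) (cs : List Int) :
    (L.foldl step cs).length = cs.length := by
  induction L generalizing cs with
  | nil => rfl
  | cons x xs ih => rw [List.foldl_cons, ih, hstep]

-- B's literal step function, rewritten through the slot dictionary into idxOf? form
theorem pv_stepB_eq (key : String) :
    (fun (counts : List Int) (p : String × List (String × Int)) =>
      match (PySem.Dict.mk ((PySem.List.enumerate pvTimes).map (fun p => (p.2, p.1)))).get? p.1 with
      | some i => counts.set i.toNat ((PySem.Dict.mk p.2).getD key 0)
      | none => counts)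
    = (fun counts p =>
      match List.idxOf? p.1 pvTimes with
      | some k => counts.set k ((PySem.Dict.mk p.2).getD key 0)
      | none => counts) := by
  funext cs p
  rw [pv_slot_get? pvTimes 0 p.1]
  cases List.idxOf? p.1 pvTimes with
  | none => rfl
  | some k => simp

-- B's counts equal A's per-label lookups
theorem pv_counts_eq (daily_data : List (String × List (String × Int))) (key : String)
    (hpre : (daily_data.map Prod.fst).Nodup) :
    daily_data.foldl (fun counts p =>
      match (PySem.Dict.mk ((PySem.List.enumerate pvTimes).map (fun p => (p.2, p.1)))).get? p.1 with
      | some i => counts.set i.toNat ((PySem.Dict.mk p.2).getD key 0)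
      | none => counts) (List.replicate pvTimes.length 0)
    = pvTimes.map (fun time =>
      (PySem.Dict.mk ((PySem.Dict.mk daily_data).getD time [])).getD key 0) := by
  rw [pv_stepB_eq]
  apply List.ext_getElem?
  intro j
  by_cases hj : j < pvTimes.length
  · have hjc : j < (List.replicate pvTimes.length (0 : Int)).length := by simpa using hj
    rw [pv_scatter_get pvTimes (fun inner => (PySem.Dict.mk inner).getD key 0) daily_data _ hpre j hjc]
    rw [List.getElem?_map, List.getElem?_eq_getElem hj]
    simp only [Option.map_some]
    have hpred : daily_data.find? (fun p => List.idxOf? p.1 pvTimes == some j)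
        = daily_data.find? (fun p => p.1 == pvTimes[j]) := by
      apply pv_find?_congr daily_data
      intro p _
      by_cases hp : p.1 = pvTimes[j]
      · have hsome : List.idxOf? p.1 pvTimes = some j := by
          apply List.idxOf?_eq_some_iff.mpr
          refine ⟨hj, hp.symm, fun i hij hit => ?_⟩
          exact absurd ((List.Nodup.getElem_inj_iff pvTimes_nodup).mp (hit.trans hp)) (by omega)
        have h1 : (List.idxOf? p.1 pvTimes == some j) = true := by simp [hsome]
        have h2 : (p.1 == pvTimes[j]) = true := by simp [hp]
        rw [h1, h2]
      · have hno : ¬ List.idxOf? p.1 pvTimes = some j := by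
          intro h
          obtain ⟨hlt, ht, -⟩ := List.idxOf?_eq_some_iff.mp h
          exact hp ht.symm
        have h1 : (List.idxOf? p.1 pvTimes == some j) = false := by
          simpa using hno
        have h2 : (p.1 == pvTimes[j]) = false := beq_eq_false_iff_ne.mpr hp
        rw [h1, h2]
    rw [hpred, pv_A_lookup daily_data key pvTimes[j]]
    rw [List.getElem_replicate]
  · conv_rhs => rw [List.getElem?_eq_none (by simpa using not_lt.mp hj)]
    apply List.getElem?_eq_none
    rw [pv_scatter_length _ (fun cs p => by cases List.idxOf? p.1 pvTimes <;> simp)]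
    simp only [List.length_replicate]
    omega

-- ===== VERDICT (by name: the statement is the Claim_ definition above) =====
theorem get_ten_minute_data_spec : Claim_equal_get_ten_minute_data := by
  intro daily_data key _ hpre
  unfold Spec_get_ten_minute_data get_ten_minute_data get_ten_minute_data_alt
  show (_, _) = (_, _)
  rw [pv_timesA_eq]
  rw [show ((PySem.List.pyRange 480 1321 10).map (fun m =>
    PySem.Str.zfill (PySem.Int.toStr (PySem.Int.floordiv m 60)) 2 ++ ":" ++ PySem.Str.zfill (PySem.Int.toStr (PySem.Int.mod m 60)) 2)) = pvTimes from rfl]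
  rw [pv_counts_eq daily_data key hpre]
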